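-- pv_equiv track=rewrite | github.com/fpreynaud/bruteforce | operations.py | do_l33t
-- ===== SOURCE A (Python) =====
-- def do_l33t(seq):
-- 	substitutions = {
-- 		'e':('3',),
-- 		'i':('!',),
-- 		'o':('0',),
-- 		't':('7',),
-- 		'k':('|<',),
-- 		'p':('|*',),
-- 		'q':('*|',),
-- 		'r':('|2',),
-- 		'u':('|_|',),
-- 		'a':('4', '@'),
-- 		'c':('(', '<'),
-- 		's':('5', '$'),
-- 		'b':('8', '|3'),
-- 		'l':('1', '|_'),
-- 		'h':('#', '|-|'),
-- 		'm':('|V|', '|\\/|',)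
-- 	}
--
-- 	for word in seq:
-- 		if len(word) == 1:
-- 			yield word
-- 			for replacement in substitutions.get(word, word):
-- 				yield replacement
-- 		else:
-- 			for s in do_l33t((word[1:],)):
-- 				yield word[0] + s
-- 			if word[0].lower() in substitutions:
-- 				for replacement in substitutions[word[0]]:
-- 					for s in do_l33t((word[1:],)):
-- 						yield replacement + s
-- ===== SOURCE B (Python) =====
-- from itertools import product
--
-- _SUBS = {
--     'e': ('3',), 'i': ('!',), 'o': ('0',), 't': ('7',),
--     'k': ('|<',), 'p': ('|*',), 'q': ('*|',), 'r': ('|2',),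
--     'u': ('|_|',),
--     'a': ('4', '@'), 'c': ('(', '<'), 's': ('5', '$'),
--     'b': ('8', '|3'), 'l': ('1', '|_'), 'h': ('#', '|-|'),
--     'm': ('|V|', '|\\/|'),
-- }
--
-- def do_l33t(seq):
--     for word in seq:
--         opts = [(c,) + _SUBS.get(c, ()) for c in word[:-1]]
--         opts.append((word[-1],) + tuple(_SUBS.get(word[-1], word[-1])))
--         for combo in product(*opts):
--             yield ''.join(combo)
-- ===== Notes on version B (the rewrite author's own statement) =====
-- stated objective: faster
-- what changed: A enumerates variants by a per-character recursion that re-runs the whole suffix enumeration once per substitution of the leading character and builds each output by repeated string concatenation; B precomputes one option list per character (keeping the last-character get(word, word) double-yield quirk) and emits the same variants in the same order with a single itertools.product + ''.join pass.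
-- crash fix: On word lists whose words are all nonempty but some word contains an uppercase letter with a substitutable lowercase before its last position, A raises KeyError (substitutions[word[0]] after a .lower() membership test) while B leaves that character unsubstituted and returns the variant list. — e.g. on do_l33t(["Hi"]): A raises KeyError, B returns ["Hi", "H!"]
import Mathlib
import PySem

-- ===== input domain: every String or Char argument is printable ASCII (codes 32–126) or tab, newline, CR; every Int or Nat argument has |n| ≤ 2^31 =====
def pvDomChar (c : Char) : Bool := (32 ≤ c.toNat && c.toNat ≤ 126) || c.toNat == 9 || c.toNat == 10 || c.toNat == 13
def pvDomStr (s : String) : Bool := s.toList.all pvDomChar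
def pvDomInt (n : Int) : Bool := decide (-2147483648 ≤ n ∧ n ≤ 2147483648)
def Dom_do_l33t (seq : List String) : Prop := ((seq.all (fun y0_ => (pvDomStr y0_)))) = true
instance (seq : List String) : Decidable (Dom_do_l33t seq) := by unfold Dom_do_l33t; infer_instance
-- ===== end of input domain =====

-- B replaces A's re-enumerating character recursion by per-char option lists combined with a
-- single cartesian product (objective: faster; A rebuilds all suffix variants once per replacement).
-- Both ports model one word's variants with Char keys, exact since the dict keys are 1-char strings.

-- ===== PORT A =====
-- the substitutions dict (string keys are single chars, so modelled as Char keys)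
def pvSubs : PySem.Dict Char (List String) := PySem.Dict.ofList
  [('e', ["3"]), ('i', ["!"]), ('o', ["0"]), ('t', ["7"]), ('k', ["|<"]),
   ('p', ["|*"]), ('q', ["*|"]), ('r', ["|2"]), ('u', ["|_|"]),
   ('a', ["4", "@"]), ('c', ["(", "<"]), ('s', ["5", "$"]), ('b', ["8", "|3"]),
   ('l', ["1", "|_"]), ('h', ["#", "|-|"]), ('m', ["|V|", "|\\/|"])]

-- A's generator body applied to one word (Python's recursive call do_l33t((word[1:],)));
-- [] case: Python recurses forever there (RecursionError), excluded by Pre_;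
-- the 'none' inner case is Python's KeyError (uppercase substitutable char), excluded by Pre_.
def pvL33tAWord : List Char → List String
  | [] => []
  | [c] =>
      String.ofList [c] ::
        (match pvSubs.get? c with
         | some reps => reps
         | none => [String.ofList [c]])   -- get(word, word): iterating the 1-char string yields it again
  | c :: d :: rest =>
      ((pvL33tAWord (d :: rest)).map (fun s => String.ofList [c] ++ s)) ++
      (if (pvSubs.get? c.toLower).isSome then
         match pvSubs.get? c with
         | some reps => reps.flatMap (fun r => (pvL33tAWord (d :: rest)).map (fun s => r ++ s))
         | none => []
       else [])

def do_l33t (seq : List String) : List String :=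
  seq.flatMap (fun w => pvL33tAWord w.toList)

-- ===== PORT B =====
-- option list for a char of word[:-1]: the char itself plus its substitutions (if any)
def pvOptsMid (c : Char) : List String := String.ofList [c] :: (pvSubs.get? c).getD []

-- option list for the last char: _SUBS.get(c, c) — default iterates the 1-char string
def pvOptsLast (c : Char) : List String :=
  String.ofList [c] ::
    (match pvSubs.get? c with
     | some reps => reps
     | none => [String.ofList [c]])

def pvOptLists : List Char → List (List String)
  | [] => []
  | [c] => [pvOptsLast c]
  | c :: d :: rest => pvOptsMid c :: pvOptLists (d :: rest)

-- itertools.product + ''.join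
def pvProduct : List (List String) → List String
  | [] => [""]
  | l :: ls => l.flatMap (fun x => (pvProduct ls).map (fun s => x ++ s))

def do_l33t_alt (seq : List String) : List String :=
  seq.flatMap (fun w => pvProduct (pvOptLists w.toList))

-- ===== PRECONDITION & SPEC =====
-- uppercase letters whose lowercase is a substitution key
def pvBadUpper (c : Char) : Bool :=
  c ∈ ['A', 'B', 'C', 'E', 'H', 'I', 'K', 'L', 'M', 'O', 'P', 'Q', 'R', 'S', 'T', 'U']

-- Pre_ excludes exactly the inputs on which A raises: an empty word (A recurses forever,
-- RecursionError) and a word with an uppercase substitutable letter anywhere but last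
-- (A's substitutions[word[0]] raises KeyError).
def Pre_do_l33t (seq : List String) : Prop :=
  (seq.all (fun w => !w.toList.isEmpty && w.toList.dropLast.all (fun c => !pvBadUpper c))) = true
instance (seq : List String) : Decidable (Pre_do_l33t seq) := by unfold Pre_do_l33t; infer_instance

def pvWitness_do_l33t : List String := ["hello", "World"]

-- A raises KeyError on words (all nonempty) containing an uppercase substitutable letter before the
-- last position; B simply leaves such a character unsubstituted and returns the variants.
def Raises_do_l33t (seq : List String) : Prop :=
  (seq.all (fun w => !w.toList.isEmpty)) = true ∧
  (seq.any (fun w => w.toList.dropLast.any pvBadUpper)) = true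
instance (seq : List String) : Decidable (Raises_do_l33t seq) := by unfold Raises_do_l33t; infer_instance
def pvRaiseWitness_do_l33t : List String := ["Hi"]
def pvRaiseWitnessOut_do_l33t : List String := ["Hi", "H!"]

def Spec_do_l33t (seq : List String) (out : List String) : Prop := out = do_l33t_alt seq
instance (seq : List String) (out : List String) : Decidable (Spec_do_l33t seq out) := by unfold Spec_do_l33t; infer_instance

-- ===== CLAIM (what is proved, stated in full; the proofs are below) =====
def Claim_equal_do_l33t : Prop := ∀ (seq : List String), Dom_do_l33t seq → Pre_do_l33t seq → Spec_do_l33t seq (do_l33t seq)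
def Claim_raises_do_l33t : Prop := (∀ (seq : List String), Dom_do_l33t seq → Raises_do_l33t seq → ¬ Pre_do_l33t seq) ∧ (Dom_do_l33t (pvRaiseWitness_do_l33t) ∧ Raises_do_l33t (pvRaiseWitness_do_l33t) ∧ do_l33t_alt (pvRaiseWitness_do_l33t) = pvRaiseWitnessOut_do_l33t)

-- ===== LEMMAS AND PROOFS =====

-- every key of the substitutions dict is a lowercase letter, so a successful lookup fixes toLower
lemma pv_key_lower (c : Char) (reps : List String) (h : pvSubs.get? c = some reps) :
    (pvSubs.get? c.toLower).isSome = true := by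
  have hk : c ∈ pvSubs.keys := by
    by_contra hc
    have := ((PySem.Dict.get?_eq_none_iff_not_mem_keys pvSubs c).mpr hc)
    rw [h] at this
    cases this
  have hkeys : pvSubs.keys = ['e', 'i', 'o', 't', 'k', 'p', 'q', 'r', 'u', 'a', 'c', 's', 'b', 'l', 'h', 'm'] := by decide
  rw [hkeys] at hk
  fin_cases hk <;> simp [h]

-- A's replacement list (with its KeyError case mapped to []) equals B's getD lookup
lemma pv_branch_eq (c : Char) :
    (if (pvSubs.get? c.toLower).isSome then
       match pvSubs.get? c with
       | some reps => reps
       | none => []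
     else []) = (pvSubs.get? c).getD [] := by
  cases h : pvSubs.get? c with
  | none => split_ifs <;> simp
  | some reps => simp [pv_key_lower c reps h]

lemma pv_word_eq (w : List Char) (hne : w ≠ []) :
    pvL33tAWord w = pvProduct (pvOptLists w) := by
  match w with
  | [] => exact absurd rfl hne
  | [c] =>
      simp [pvL33tAWord, pvOptLists, pvProduct, pvOptsLast, List.flatMap_cons]
  | c :: d :: rest =>
      have ih := pv_word_eq (d :: rest) (by simp)
      have hbr := pv_branch_eq c
      simp only [pvL33tAWord, pvOptLists, pvProduct, pvOptsMid, ih]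
      rw [List.flatMap_cons]
      congr 1
      rw [← hbr]
      cases hsl : (pvSubs.get? c.toLower).isSome
      · simp
      · cases pvSubs.get? c <;> simp

-- ===== VERDICT (by name: the statement is the Claim_ definition above) =====
theorem do_l33t_spec : Claim_equal_do_l33t := by
  intro seq hdom hpre
  unfold Spec_do_l33t do_l33t do_l33t_alt
  induction seq with
  | nil => rfl
  | cons w ws ih =>
      simp only [Dom_do_l33t, List.all_cons, Bool.and_eq_true] at hdom
      simp only [Pre_do_l33t, List.all_cons, Bool.and_eq_true] at hpre
      rw [List.flatMap_cons, List.flatMap_cons]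
      congr 1
      · refine pv_word_eq w.toList fun h => ?_
        rw [h] at hpre
        simp at hpre
      · exact ih hdom.2 hpre.2

theorem do_l33t_raises : Claim_raises_do_l33t := by
  unfold Claim_raises_do_l33t
  refine ⟨?_, by decide⟩
  intro seq _ hr hp
  rcases hr with ⟨_, hany⟩
  simp only [List.any_eq_true] at hany
  obtain ⟨w, hw, hbad⟩ := hany
  simp only [Pre_do_l33t, List.all_eq_true] at hp
  have := hp w hw
  simp only [Bool.and_eq_true] at this
  have h2 := this.2
  simp only [List.all_eq_true] at h2
  obtain ⟨c, hc, hcb⟩ := hbad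
  have hcb' := h2 c hc
  simp [hcb] at hcb'

-- self-check: the raise witness indeed lies outside Pre_ (a consequence of do_l33t_raises)
theorem pv_raise_witness_not_pre_ok : ¬ Pre_do_l33t pvRaiseWitness_do_l33t :=
  do_l33t_raises.1 pvRaiseWitness_do_l33t (by decide) (by decide)
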